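-- pv_equiv track=rewrite | github.com/awadhesh14/CodechefDSA | foundation/src/ALTARAY.py | func
-- ===== SOURCE A (Python) =====
-- def sign(n):
-- 	return n>0
--
-- def func(a,sgn,ans,A,N):
-- 	if a>=N:
-- 		return 0
-- 	ans[a] = 1 + func(a+1,sign(A[a]),ans,A,N)
-- 	if sign(A[a])!=sgn:
-- 		return ans[a]
-- 	else:
-- 		return 0
-- ===== SOURCE B (Python) =====
-- def sign(n):
--     return n > 0
--
-- def func(a, sgn, ans, A, N):
--     # Iterative backward fill replacing A's recursion; same writes to ans, same return value.
--     if a >= N: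
--         return 0
--     prev = 0
--     for i in range(N - 1, a - 1, -1):
--         nxt = prev if i + 1 < N and sign(A[i + 1]) != sign(A[i]) else 0
--         cur = 1 + nxt
--         ans[i] = cur
--         prev = cur
--     return prev if sign(A[a]) != sgn else 0
-- ===== Notes on version B (the rewrite author's own statement) =====
-- stated objective: alternative
-- what changed: Replaces A's deep recursion (one stack frame per index from a to N) by a single iterative backward loop over range(N-1, a-1, -1) that carries the previously computed segment length in a variable, performing the same writes to ans and producing the same return value without recursion.
import Mathlib
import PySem

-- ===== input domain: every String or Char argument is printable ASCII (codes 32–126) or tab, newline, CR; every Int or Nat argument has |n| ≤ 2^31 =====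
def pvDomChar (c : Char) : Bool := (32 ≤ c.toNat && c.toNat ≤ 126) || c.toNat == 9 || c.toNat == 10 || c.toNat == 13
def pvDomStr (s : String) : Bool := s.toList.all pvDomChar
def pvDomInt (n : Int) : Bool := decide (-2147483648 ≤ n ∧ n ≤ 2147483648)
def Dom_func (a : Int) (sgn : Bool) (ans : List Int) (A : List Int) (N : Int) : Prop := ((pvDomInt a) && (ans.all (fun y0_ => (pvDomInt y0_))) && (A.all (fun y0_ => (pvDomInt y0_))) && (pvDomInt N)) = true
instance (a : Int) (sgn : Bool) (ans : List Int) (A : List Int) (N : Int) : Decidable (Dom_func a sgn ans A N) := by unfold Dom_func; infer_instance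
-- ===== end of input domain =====

-- B replaces A's deep recursion by a single backward loop carrying the last computed value;
-- both write the same values to the same cells of ans, and the equivalence proved here is about the RETURN value.

-- ===== PORT A =====
def pySign (n : Int) : Bool := decide (n > 0)

-- Literal port of A's recursion; the in-place mutation of `ans` is threaded as part of the state.
-- pyGetD/pySetD are exact under Pre_func (an out-of-range index is an IndexError, excluded by Pre_func).
def funcRecA (a : Int) (sgn : Bool) (ans : List Int) (A : List Int) (N : Int) : List Int × Int :=
  if h : a ≥ N then (ans, 0)
  else
    let res := funcRecA (a + 1) (pySign (PySem.List.pyGetD A a 0)) ans A N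
    let ans2 := PySem.List.pySetD res.1 a (1 + res.2)
    if pySign (PySem.List.pyGetD A a 0) ≠ sgn then (ans2, PySem.List.pyGetD ans2 a 0)
    else (ans2, 0)
termination_by (N - a).toNat
decreasing_by omega

def func (a : Int) (sgn : Bool) (ans : List Int) (A : List Int) (N : Int) : Int :=
  (funcRecA a sgn ans A N).2

-- ===== PORT B =====
-- One iteration of Source B's `for i in range(N-1, a-1, -1)` loop; state = (ans, prev).
def funcStepB (A : List Int) (N : Int) (s : List Int × Int) (i : Int) : List Int × Int :=
  let nxt := if i + 1 < N ∧ pySign (PySem.List.pyGetD A (i + 1) 0) ≠ pySign (PySem.List.pyGetD A i 0) then s.2 else 0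
  let cur := 1 + nxt
  (PySem.List.pySetD s.1 i cur, cur)

def func_alt (a : Int) (sgn : Bool) (ans : List Int) (A : List Int) (N : Int) : Int :=
  if a ≥ N then 0
  else
    let st := (PySem.List.pyRange (N - 1) (a - 1) (-1)).foldl (funcStepB A N) (ans, 0)
    if pySign (PySem.List.pyGetD A a 0) ≠ sgn then st.2 else 0

-- ===== PRECONDITION & SPEC =====
-- Exactly the inputs on which Python A returns: when a < N it indexes A[i] and ans[i]
-- for every i in [a, N), so both lists need N ≤ len and -len ≤ a (else IndexError).
def Pre_func (a : Int) (sgn : Bool) (ans : List Int) (A : List Int) (N : Int) : Prop :=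
  a < N → (N ≤ (A.length : Int) ∧ N ≤ (ans.length : Int) ∧ -(A.length : Int) ≤ a ∧ -(ans.length : Int) ≤ a)
instance (a : Int) (sgn : Bool) (ans : List Int) (A : List Int) (N : Int) : Decidable (Pre_func a sgn ans A N) := by unfold Pre_func; infer_instance

def pvWitness_func : Int × Bool × List Int × List Int × Int := (0, false, [0, 0, 0], [1, -2, 3], 3)

def Spec_func (a : Int) (sgn : Bool) (ans : List Int) (A : List Int) (N : Int) (out : Int) : Prop := out = func_alt a sgn ans A N
instance (a : Int) (sgn : Bool) (ans : List Int) (A : List Int) (N : Int) (out : Int) : Decidable (Spec_func a sgn ans A N out) := by unfold Spec_func; infer_instance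

-- ===== CLAIM (what is proved, stated in full; the proofs are below) =====
def Claim_equal_func : Prop := ∀ (a : Int) (sgn : Bool) (ans : List Int) (A : List Int) (N : Int), Dom_func a sgn ans A N → Pre_func a sgn ans A N → Spec_func a sgn ans A N (func a sgn ans A N)

-- ===== LEMMAS AND PROOFS =====

theorem pyGetD_pySetD_self (xs : List Int) (i v d : Int) (h : PySem.Raise.InRange xs.length i) :
    PySem.List.pyGetD (PySem.List.pySetD xs i v) i d = v := by
  unfold PySem.List.pyGetD PySem.List.pySetD PySem.List.pyGet? PySem.List.pySet? PySem.List.pyIdx?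
  simp [PySem.Raise.InRange] at h
  obtain ⟨h1, h2⟩ := h
  by_cases hi : 0 ≤ i
  · have ht : i.toNat < xs.length := by omega
    simp [hi, h2, ht]
  · have ht : xs.length - (-i).toNat < xs.length := by omega
    simp [hi, h1, ht]

theorem length_foldl_stepB (A : List Int) (N : Int) (l : List Int) (s : List Int × Int) :
    (l.foldl (funcStepB A N) s).1.length = s.1.length := by
  induction l generalizing s with
  | nil => rfl
  | cons x xs ih => rw [List.foldl_cons, ih]; simp [funcStepB, PySem.List.length_pySetD]

theorem range_split (a N : Int) (h : a < N) :
    PySem.List.pyRange (N - 1) (a - 1) (-1) = PySem.List.pyRange (N - 1) a (-1) ++ [a] := by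
  rw [PySem.List.pyRange_neg_one_eq_reverse, PySem.List.pyRange_neg_one_eq_reverse]
  have e1 : a - 1 + 1 = a := by ring
  have e2 : N - 1 + 1 = N := by ring
  rw [e1, e2, PySem.List.pyRange_one_cons h, List.reverse_cons]

theorem funcRecA_eq (A : List Int) (N : Int) (ans : List Int) (hN : N ≤ (ans.length : Int)) :
    ∀ (n : Nat) (a : Int) (sgn : Bool), (N - a).toNat = n → a < N → -(ans.length : Int) ≤ a →
    funcRecA a sgn ans A N =
      (((PySem.List.pyRange (N - 1) (a - 1) (-1)).foldl (funcStepB A N) (ans, 0)).1,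
       if pySign (PySem.List.pyGetD A a 0) ≠ sgn
       then ((PySem.List.pyRange (N - 1) (a - 1) (-1)).foldl (funcStepB A N) (ans, 0)).2
       else 0) := by
  intro n
  induction n with
  | zero => intro a sgn hn ha _; omega
  | succ n ih =>
    intro a sgn hn ha hlo
    have hrange : PySem.Raise.InRange ans.length a := by
      simp [PySem.Raise.InRange]; omega
    rw [funcRecA]
    simp only [not_le.mpr ha]
    rw [range_split a N ha, List.foldl_append]
    by_cases h2 : a + 1 < N
    · rw [ih (a + 1) (pySign (PySem.List.pyGetD A a 0)) (by omega) h2 (by omega)]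
      have e1 : a + 1 - 1 = a := by ring
      rw [e1]
      set st' := (PySem.List.pyRange (N - 1) (a - 1 + 1) (-1)).foldl (funcStepB A N) (ans, 0) with hst'
      have e2 : a - 1 + 1 = a := by ring
      rw [e2] at hst'
      have hlen : st'.1.length = ans.length := by rw [hst']; exact length_foldl_stepB _ _ _ _
      have hget : PySem.List.pyGetD (PySem.List.pySetD st'.1 a
          (1 + if pySign (PySem.List.pyGetD A (a+1) 0) ≠ pySign (PySem.List.pyGetD A a 0) then st'.2 else 0)) a 0
          = 1 + if pySign (PySem.List.pyGetD A (a+1) 0) ≠ pySign (PySem.List.pyGetD A a 0) then st'.2 else 0 :=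
        pyGetD_pySetD_self _ _ _ _ (by rw [hlen]; exact hrange)
      simp only [List.foldl_cons, List.foldl_nil, funcStepB, h2, true_and]
      split_ifs <;> simp_all
    · have haN : a + 1 ≥ N := by omega
      rw [funcRecA]
      simp only [dif_pos haN]
      have hnil : PySem.List.pyRange (N - 1) a (-1) = [] :=
        PySem.List.pyRange_neg_one_eq_nil (by omega)
      rw [hnil]
      simp only [List.foldl_nil, List.foldl_cons, funcStepB, h2, false_and]
      have hget : PySem.List.pyGetD (PySem.List.pySetD ans a (1 + 0)) a 0 = 1 + 0 :=
        pyGetD_pySetD_self _ _ _ _ hrange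
      split_ifs <;> simp_all

-- ===== VERDICT (by name: the statement is the Claim_ definition above) =====
theorem func_spec : Claim_equal_func := by
  intro a sgn ans A N _ hpre
  unfold Spec_func func func_alt
  by_cases h : a ≥ N
  · simp only [if_pos h]
    rw [funcRecA]
    simp [h]
  · rw [not_le] at h
    obtain ⟨_, h2, _, h4⟩ := hpre h
    rw [funcRecA_eq A N ans h2 (N - a).toNat a sgn rfl h h4]
    simp [not_le.mpr h]
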